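-- pv_equiv track=rewrite | github.com/Sam-2727/String-Monte-Carlo | lightcone formalism/local_channel_response.py | xi_degree_profile
-- ===== SOURCE A (Python) =====
-- def xi_degree_profile(
--     poly: dict[tuple[int, ...], complex],
-- ) -> dict[int, int]:
--     profile: dict[int, int] = {}
--     for monomial in poly:
--         degree = len(monomial)
--         profile[degree] = profile.get(degree, 0) + 1
--     return dict(sorted(profile.items()))
-- ===== SOURCE B (Python) =====
-- def xi_degree_profile(
--     poly: dict[tuple[int, ...], complex],
-- ) -> dict[int, int]:
--     degrees = sorted(len(m) for m in poly)
--     if not degrees: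
--         return {}
--     out: dict[int, int] = {}
--     cur = degrees[0]
--     cnt = 1
--     for d in degrees[1:]:
--         if d == cur:
--             cnt += 1
--         else:
--             out[cur] = cnt
--             cur, cnt = d, 1
--     out[cur] = cnt
--     return out
-- ===== Notes on version B (the rewrite author's own statement) =====
-- stated objective: alternative
-- what changed: Replaces the count-into-a-dict-then-sort-the-items scheme by sorting the list of degrees first and emitting (degree, run length) pairs in one run-length pass over the sorted list, which produces the profile already in ascending degree order.
import Mathlib
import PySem

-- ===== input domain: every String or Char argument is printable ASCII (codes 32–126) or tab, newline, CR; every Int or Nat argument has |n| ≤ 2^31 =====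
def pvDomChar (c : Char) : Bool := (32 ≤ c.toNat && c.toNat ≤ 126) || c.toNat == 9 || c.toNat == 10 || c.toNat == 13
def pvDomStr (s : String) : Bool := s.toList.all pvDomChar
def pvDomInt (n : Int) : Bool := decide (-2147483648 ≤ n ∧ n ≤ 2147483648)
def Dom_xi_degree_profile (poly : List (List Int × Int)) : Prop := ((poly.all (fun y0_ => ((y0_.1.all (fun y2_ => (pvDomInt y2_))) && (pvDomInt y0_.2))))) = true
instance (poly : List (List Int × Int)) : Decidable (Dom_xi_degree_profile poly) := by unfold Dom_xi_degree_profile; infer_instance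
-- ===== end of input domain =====

-- B sorts the degree list once and emits (degree, run length) pairs in one pass,
-- instead of A's count-into-a-dict-then-sort-the-items; same result, similar cost.

-- ===== PORT A =====
def xi_degree_profile (poly : List (List Int × Int)) : List (Int × Int) :=
  let profile : PySem.Dict Int Int :=
    poly.foldl (fun d monomial =>
      let degree : Int := monomial.1.length
      d.insert degree (d.getD degree 0 + 1)) PySem.Dict.empty
  PySem.List.sorted2 profile.items Prod.fst Prod.snd

-- ===== PORT B =====
-- run-length pass over the sorted degree list (`cur`/`cnt` loop of Source B)
def pvRleGo (d c : Int) : List Int → List (Int × Int)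
  | [] => [(d, c)]
  | x :: xs => if x = d then pvRleGo d (c + 1) xs else (d, c) :: pvRleGo x 1 xs

def xi_degree_profile_alt (poly : List (List Int × Int)) : List (Int × Int) :=
  let degrees := PySem.List.sorted (poly.map (fun m => (m.1.length : Int))) (fun x => x)
  match degrees with
  | [] => []
  | d :: rest => pvRleGo d 1 rest

-- ===== PRECONDITION & SPEC =====
def Spec_xi_degree_profile (poly : List (List Int × Int)) (out : List (Int × Int)) : Prop := out = xi_degree_profile_alt poly
instance (poly : List (List Int × Int)) (out : List (Int × Int)) : Decidable (Spec_xi_degree_profile poly out) := by unfold Spec_xi_degree_profile; infer_instance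

-- ===== CLAIM (what is proved, stated in full; the proofs are below) =====
def Claim_equal_xi_degree_profile : Prop := ∀ (poly : List (List Int × Int)), Dom_xi_degree_profile poly → Spec_xi_degree_profile poly (xi_degree_profile poly)

-- ===== LEMMAS AND PROOFS =====

-- insertBy only looks at `before x b` for b in the list
lemma pv_insertBy_congr {α : Type} (before before' : α → α → Bool) (x : α) (acc : List α)
    (h : ∀ b ∈ acc, before x b = before' x b) :
    PySem.List.insertBy before x acc = PySem.List.insertBy before' x acc := by
  induction acc with
  | nil => rfl
  | cons y ys ih =>
    simp only [PySem.List.insertBy]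
    rw [h y (by simp)]
    by_cases hxy : before' x y = true
    · simp [hxy]
    · simp only [hxy]
      rw [ih (fun b hb => h b (by simp [hb]))]

-- the insertion-sort fold only compares elements of xs ++ acc
lemma pv_foldl_insertBy_congr {α : Type} (before before' : α → α → Bool) (xs : List α)
    (acc : List α)
    (h : ∀ a, (a ∈ xs ∨ a ∈ acc) → ∀ b, (b ∈ xs ∨ b ∈ acc) → before a b = before' a b) :
    xs.foldl (fun acc x => PySem.List.insertBy before x acc) acc
      = xs.foldl (fun acc x => PySem.List.insertBy before' x acc) acc := by
  induction xs generalizing acc with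
  | nil => rfl
  | cons x xs ih =>
    simp only [List.foldl_cons]
    rw [pv_insertBy_congr before before' x acc
      (fun b hb => h x (Or.inl (by simp)) b (Or.inr hb))]
    apply ih
    intro a ha b hb
    apply h a _ b
    · rcases hb with hb | hb
      · exact Or.inl (by simp [hb])
      · rcases (PySem.List.mem_insertBy _ _ _ _).1 hb with rfl | hb'
        · exact Or.inl (by simp)
        · exact Or.inr hb'
    · rcases ha with ha | ha
      · exact Or.inl (by simp [ha])
      · rcases (PySem.List.mem_insertBy _ _ _ _).1 ha with rfl | ha'
        · exact Or.inl (by simp)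
        · exact Or.inr ha'

-- when fst is injective on xs, lexicographic pair sort is sort by fst
lemma pv_sorted2_eq_sorted_fst (xs : List (Int × Int))
    (hinj : ∀ a ∈ xs, ∀ b ∈ xs, a.1 = b.1 → a = b) :
    PySem.List.sorted2 xs Prod.fst Prod.snd = PySem.List.sorted xs Prod.fst := by
  show xs.foldl _ [] = xs.foldl _ []
  apply pv_foldl_insertBy_congr
  intro a ha b hb
  rcases ha with ha | ha; swap; · simp at ha
  rcases hb with hb | hb; swap; · simp at hb
  by_cases h1 : a.1 < b.1
  · simp [h1]
  · by_cases h2 : b.1 < a.1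
    · simp [h1, h2]
    · have : a = b := hinj a ha b hb (le_antisymm (not_lt.1 h2) (not_lt.1 h1))
      subst this
      simp

-- dedup commutes with filter
lemma pv_ofList_filter (p : Int → Bool) (xs : List Int) :
    PySem.Set.ofList (xs.filter p) = (PySem.Set.ofList xs).filter p := by
  induction xs with
  | nil => simp [PySem.Set.ofList_nil]
  | cons x xs ih =>
    rw [List.filter_cons]
    by_cases hp : p x = true
    · rw [if_pos hp, PySem.Set.ofList_cons, PySem.Set.ofList_cons]
      simp only [PySem.Set.discard, List.filter_cons, hp, if_pos]
      rw [ih, List.filter_filter, List.filter_filter]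
      congr 1
      ext a
      simp [Bool.and_comm]
    · rw [if_neg hp, PySem.Set.ofList_cons, ih]
      simp only [List.filter_cons, hp]
      rw [PySem.Set.discard, List.filter_filter]
      apply (List.filter_congr _).symm
      intro a _
      by_cases hax : a = x
      · subst hax; simp [hp]
      · simp [hax]

-- ofList keeps a subsequence of the original list
lemma pv_ofList_sublist (xs : List Int) : (PySem.Set.ofList xs).Sublist xs := by
  induction xs with
  | nil => simp [PySem.Set.ofList_nil]
  | cons x xs ih =>
    rw [PySem.Set.ofList_cons]
    exact List.Sublist.cons₂ x (List.Sublist.trans List.filter_sublist ih)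

-- run-length step on a sorted tail bounded below by d
lemma pv_rleGo_spec (L : List Int) (d c : Int)
    (hs : L.Pairwise (· ≤ ·)) (hd : ∀ x ∈ L, d ≤ x) :
    pvRleGo d c L = (d, c + (L.count d : Int)) ::
      (PySem.Set.ofList (L.filter (fun y => !(y == d)))).map
        (fun k => (k, (L.count k : Int))) := by
  induction L generalizing d c with
  | nil => simp [pvRleGo, PySem.Set.ofList_nil]
  | cons x xs ih =>
    rcases List.pairwise_cons.1 hs with ⟨hx, hxs⟩
    by_cases hxd : x = d
    · subst hxd
      rw [pvRleGo, if_pos rfl, ih x (c + 1) hxs hx]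
      simp only [List.count_cons_self, List.filter_cons, beq_self_eq_true, Bool.not_true,
        Bool.false_eq_true, if_false]
      refine List.cons_eq_cons.2 ⟨?_, ?_⟩
      · have : c + 1 + (List.count x xs : Int) = c + ((List.count x xs + 1 : Nat) : Int) := by
          push_cast; ring
        rw [this]
      · apply List.map_congr_left
        intro k hk
        have hk' := (List.mem_filter.1 ((PySem.Set.mem_ofList _ _).1 hk)).2
        have hkx : k ≠ x := by simpa using hk'
        simp [Ne.symm hkx]
    · have hdx : d < x := lt_of_le_of_ne (hd x (by simp)) (Ne.symm hxd)
      have hnotd : ∀ y ∈ x :: xs, y ≠ d := by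
        intro y hy
        rcases List.mem_cons.1 hy with rfl | hy'
        · exact hxd
        · exact fun h => absurd (hx y hy') (by rw [h]; exact not_le.2 hdx)
      rw [pvRleGo, if_neg hxd, ih x 1 hxs (fun y hy => hx y hy)]
      have hcount0 : (x :: xs).count d = 0 :=
        List.count_eq_zero.2 (fun h => hnotd d h rfl)
      have hfilter : (x :: xs).filter (fun y => !(y == d)) = x :: xs :=
        List.filter_eq_self.2 (fun y hy => by simpa using hnotd y hy)
      rw [hfilter, hcount0, PySem.Set.ofList_cons]
      simp only [Nat.cast_zero, add_zero, List.map_cons, List.count_cons_self,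
        PySem.Set.discard, ← pv_ofList_filter]
      refine List.cons_eq_cons.2 ⟨rfl, List.cons_eq_cons.2 ⟨?_, ?_⟩⟩
      · have : 1 + (List.count x xs : Int) = ((List.count x xs + 1 : Nat) : Int) := by
          push_cast; ring
        rw [this]
      · apply List.map_congr_left
        intro k hk
        have hk' := (List.mem_filter.1 ((PySem.Set.mem_ofList _ _).1 hk)).2
        have hkx : k ≠ x := by simpa using hk'
        simp [Ne.symm hkx]

-- nondecreasing + nodup = strictly increasing
lemma pv_pairwise_lt_of_le_nodup (L : List Int) (h1 : L.Pairwise (· ≤ ·)) (h2 : L.Nodup) :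
    L.Pairwise (· < ·) :=
  (h1.and h2).imp (fun h => lt_of_le_of_ne h.1 h.2)

-- both sides equal the ascending-key profile of the degree list
lemma pv_common (ds : List Int) :
    let T := (PySem.List.sorted (PySem.Set.ofList ds) (fun x => x)).map
      (fun k => (k, (ds.count k : Int)))
    PySem.List.sorted2 (PySem.Dict.counter ds).items Prod.fst Prod.snd = T ∧
    (match PySem.List.sorted ds (fun x => x) with
      | [] => ([] : List (Int × Int))
      | d :: rest => pvRleGo d 1 rest) = T := by
  intro T
  have hT_pairwise : T.Pairwise (fun a b => a.1 < b.1) := by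
    exact (PySem.List.sorted_ofList_pairwise_lt ds).map _ (fun a b h => h)
  constructor
  · -- A side
    rw [PySem.Dict.items_counter]
    have hinj : ∀ a ∈ (PySem.Set.ofList ds).map (fun k => (k, (ds.count k : Int))),
        ∀ b ∈ (PySem.Set.ofList ds).map (fun k => (k, (ds.count k : Int))), a.1 = b.1 → a = b := by
      intro a ha b hb h1
      obtain ⟨ka, _, rfl⟩ := List.mem_map.1 ha
      obtain ⟨kb, _, rfl⟩ := List.mem_map.1 hb
      simp only at h1
      subst h1
      rfl
    rw [pv_sorted2_eq_sorted_fst _ hinj]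
    apply PySem.List.sorted_eq_of_perm_of_pairwise_lt _ _ _ _ hT_pairwise
    exact ((PySem.List.sorted_perm (PySem.Set.ofList ds) (fun x => x) false).map _)
  · -- B side
    cases hS : PySem.List.sorted ds (fun x => x) with
    | nil =>
      have hds : ds = [] := (PySem.List.sorted_eq_nil_iff _ _ _).1 hS
      subst hds
      rfl
    | cons d rest =>
      have hpair : (d :: rest).Pairwise (fun a b : Int => a ≤ b) := by
        have := PySem.List.sorted_pairwise ds (fun x => x)
        rw [hS] at this
        exact this
      rcases List.pairwise_cons.1 hpair with ⟨hdle, hrest⟩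
      have hcount : ∀ k : Int, ds.count k = (d :: rest).count k := by
        intro k
        have hperm := PySem.List.sorted_perm ds (fun x => x) false
        rw [hS] at hperm
        exact (hperm.count_eq k).symm
      have hset : PySem.List.sorted (PySem.Set.ofList ds) (fun x => x)
          = PySem.Set.ofList (d :: rest) := by
        apply PySem.List.sorted_eq_of_perm_of_pairwise_lt
        · rw [List.perm_ext_iff_of_nodup (PySem.Set.nodup_ofList _) (PySem.Set.nodup_ofList _)]
          intro a
          rw [PySem.Set.mem_ofList, PySem.Set.mem_ofList, ← hS, PySem.List.mem_sorted]
        · apply pv_pairwise_lt_of_le_nodup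
          · exact hpair.sublist (pv_ofList_sublist (d :: rest))
          · exact PySem.Set.nodup_ofList _
      show pvRleGo d 1 rest = T
      rw [pv_rleGo_spec rest d 1 hrest hdle]
      rw [show T = (PySem.List.sorted (PySem.Set.ofList ds) (fun x => x)).map
        (fun k => (k, (ds.count k : Int))) from rfl]
      rw [hset, PySem.Set.ofList_cons, PySem.Set.discard, ← pv_ofList_filter]
      simp only [List.map_cons]
      refine List.cons_eq_cons.2 ⟨?_, ?_⟩
      · rw [hcount d, List.count_cons_self]
        have : (1 : Int) + (rest.count d : Int) = ((rest.count d + 1 : Nat) : Int) := by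
          push_cast; ring
        rw [this]
      · apply List.map_congr_left
        intro k hk
        have hk' := (List.mem_filter.1 ((PySem.Set.mem_ofList _ _).1 hk)).2
        have hkd : k ≠ d := by simpa using hk'
        rw [hcount k]
        simp [Ne.symm hkd]

-- ===== VERDICT (by name: the statement is the Claim_ definition above) =====
theorem xi_degree_profile_spec : Claim_equal_xi_degree_profile := by
  intro poly _
  show xi_degree_profile poly = xi_degree_profile_alt poly
  have hds := pv_common (poly.map (fun m => (m.1.length : Int)))
  unfold xi_degree_profile xi_degree_profile_alt
  have hdict : poly.foldl (fun d monomial =>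
      let degree : Int := monomial.1.length
      d.insert degree (d.getD degree 0 + 1)) PySem.Dict.empty
      = PySem.Dict.counter (poly.map (fun m => (m.1.length : Int))) := by
    rw [← PySem.Dict.foldl_insert_getD_add_one_eq_counter, List.foldl_map]
  simp only [hdict]
  exact hds.1.trans hds.2.symm
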